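-- pv_equiv track=rewrite | github.com/BasmaElhoseny01/Dell-Hacktrick | Solvers/eagle_submission_solver.py | check_consecutive_ones
-- ===== SOURCE A (Python) =====
-- def check_consecutive_ones(y):
--     consecutive_ones = 0
--     for num in y:
--         if num == 1:
--             consecutive_ones += 1
--             if consecutive_ones >= 20:
--                 break
--         else:
--             consecutive_ones = 0
--     if consecutive_ones >= 20:
--         return True
--     else: return False
-- ===== SOURCE B (Python) =====
-- def check_consecutive_ones(y):
--     bits = ''.join('1' if num == 1 else '0' for num in y)
--     return '1' * 20 in bits
-- ===== Notes on version B (the rewrite author's own statement) =====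
-- stated objective: idiomatic
-- what changed: Replaces the running counter with reset-and-break by building a '0'/'1' bitstring with exact num == 1 comparisons and testing for the substring '1'*20.
import Mathlib
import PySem

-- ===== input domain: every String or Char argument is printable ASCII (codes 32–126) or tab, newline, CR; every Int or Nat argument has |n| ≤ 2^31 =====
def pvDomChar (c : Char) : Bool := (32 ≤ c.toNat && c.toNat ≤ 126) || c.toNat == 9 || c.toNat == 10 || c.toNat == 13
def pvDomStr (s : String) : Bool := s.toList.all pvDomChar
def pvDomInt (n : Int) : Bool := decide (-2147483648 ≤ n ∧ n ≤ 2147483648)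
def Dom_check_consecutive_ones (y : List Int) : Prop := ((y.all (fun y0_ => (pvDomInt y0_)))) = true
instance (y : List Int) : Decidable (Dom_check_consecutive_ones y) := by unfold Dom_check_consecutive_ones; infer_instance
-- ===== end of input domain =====

-- B replaces A's running counter (with reset and inline break) by building a '0'/'1'
-- bitstring and testing for the substring '1'*20 (idiomatic; substring search instead of state machine).

-- ===== PORT A =====
def check_consecutive_ones_go (l : List Int) (consecutive_ones : Int) : Int :=
  match l with
  | [] => consecutive_ones
  | num :: rest =>
    if num = 1 then
      if consecutive_ones + 1 ≥ 20 then consecutive_ones + 1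
      else check_consecutive_ones_go rest (consecutive_ones + 1)
    else check_consecutive_ones_go rest 0

def check_consecutive_ones (y : List Int) : Bool :=
  if check_consecutive_ones_go y 0 ≥ 20 then true else false

-- ===== PORT B =====
def check_consecutive_ones_alt (y : List Int) : Bool :=
  let bits : List Char := y.map (fun num => if num = 1 then '1' else '0')
  PySem.Chars.isIn (PySem.List.pyRepeat ['1'] 20) bits

-- ===== PRECONDITION & SPEC =====
def Spec_check_consecutive_ones (y : List Int) (out : Bool) : Prop := out = check_consecutive_ones_alt y
instance (y : List Int) (out : Bool) : Decidable (Spec_check_consecutive_ones y out) := by unfold Spec_check_consecutive_ones; infer_instance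

-- ===== CLAIM (what is proved, stated in full; the proofs are below) =====
def Claim_equal_check_consecutive_ones : Prop := ∀ (y : List Int), Dom_check_consecutive_ones y → Spec_check_consecutive_ones y (check_consecutive_ones y)

-- ===== LEMMAS AND PROOFS =====

-- infix as "prefix of some drop"
theorem infix_iff_exists_drop {α : Type} (sub l : List α) :
    sub <:+: l ↔ ∃ j, sub <+: l.drop j := by
  constructor
  · rintro ⟨s, t, h⟩
    exact ⟨s.length, t, by simpa using (congrArg (List.drop s.length) h.symm).symm⟩
  · rintro ⟨j, h⟩
    exact h.isInfix.trans (List.drop_suffix j l).isInfix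

-- a run of '1' chars in the mapped list corresponds to a run of 1s in y
theorem replicate_one_prefix_map (k : Nat) (z : List Int) :
    List.replicate k '1' <+: z.map (fun num => if num = 1 then '1' else '0') ↔
    List.replicate k (1 : Int) <+: z := by
  induction k generalizing z with
  | zero => simp
  | succ k ih =>
    cases z with
    | nil => simp [List.replicate_succ]
    | cons n rest =>
      simp only [List.replicate_succ, List.map_cons, List.cons_prefix_cons, ih]
      constructor
      · rintro ⟨h1, h2⟩
        refine ⟨?_, h2⟩
        by_cases hn : n = 1
        · exact hn.symm
        · rw [if_neg hn] at h1; exact absurd h1 (by decide)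
      · rintro ⟨h1, h2⟩
        exact ⟨by rw [if_pos h1.symm], h2⟩

-- A's loop characterisation: for an in-range counter, the loop reaches 20 iff the
-- remaining list starts with the missing (20-c) ones, or contains 20 consecutive ones.
theorem go_spec (y : List Int) (c : Int) (h0 : 0 ≤ c) (h20 : c < 20) :
    20 ≤ check_consecutive_ones_go y c ↔
      (List.replicate (20 - c).toNat (1 : Int) <+: y ∨ List.replicate 20 (1 : Int) <:+: y) := by
  induction y generalizing c with
  | nil =>
    simp only [check_consecutive_ones_go]
    constructor
    · intro h; omega
    · rintro (h | h)
      · have := h.length_le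
        simp at this
        omega
      · have := h.length_le
        simp at this
  | cons n rest ih =>
    by_cases hn : n = 1
    · subst hn
      have hgo : check_consecutive_ones_go (1 :: rest) c =
          if c + 1 ≥ 20 then c + 1 else check_consecutive_ones_go rest (c + 1) := by
        simp [check_consecutive_ones_go]
      rw [hgo]
      by_cases hb : c + 1 ≥ 20
      · -- break: counter reached 20
        have hc : c = 19 := by omega
        subst hc
        rw [if_pos hb]
        constructor
        · intro _
          left
          have : ((20 : Int) - 19).toNat = 1 := by decide
          rw [this]
          simp [List.cons_prefix_cons]
        · intro _; omega
      · rw [if_neg hb]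
        rw [ih (c + 1) (by omega) (by omega)]
        have hk : (20 - c).toNat = (20 - (c + 1)).toNat + 1 := by omega
        constructor
        · rintro (h | h)
          · left; rw [hk, List.replicate_succ, List.cons_prefix_cons]; exact ⟨rfl, h⟩
          · right; exact h.trans (List.suffix_cons _ _).isInfix
        · rintro (h | h)
          · left
            rw [hk, List.replicate_succ, List.cons_prefix_cons] at h
            exact h.2
          · -- 20 ones infix of 1::rest: either infix of rest, or prefix of 1::rest
            rcases (infix_iff_exists_drop _ _).1 h with ⟨j, hj⟩
            cases j with
            | zero =>
              left
              simp only [List.drop_zero, List.replicate_succ, List.cons_prefix_cons] at hj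
              have hle : List.replicate (20 - (c + 1)).toNat (1 : Int) <+: List.replicate 19 (1 : Int) := by
                refine ⟨List.replicate (19 - (20 - (c + 1)).toNat) (1 : Int), ?_⟩
                rw [List.replicate_append_replicate]
                congr 1
                omega
              exact hle.trans hj.2
            | succ j =>
              right
              exact (infix_iff_exists_drop _ _).2 ⟨j, by simpa using hj⟩
    · have hgo : check_consecutive_ones_go (n :: rest) c = check_consecutive_ones_go rest 0 := by
        simp [check_consecutive_ones_go, hn]
      rw [hgo, ih 0 (by omega) (by omega)]
      have hpre : ∀ m : Nat, 0 < m → ¬ (List.replicate m (1 : Int) <+: n :: rest) := by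
        intro m hm hp
        cases m with
        | zero => omega
        | succ m =>
          rw [List.replicate_succ, List.cons_prefix_cons] at hp
          exact hn hp.1.symm
      constructor
      · rintro (h | h)
        · right; exact (h.isInfix).trans (List.suffix_cons _ _).isInfix
        · right; exact h.trans (List.suffix_cons _ _).isInfix
      · rintro (h | h)
        · exact absurd h (hpre _ (by omega))
        · rcases (infix_iff_exists_drop _ _).1 h with ⟨j, hj⟩
          cases j with
          | zero =>
            exact absurd (by simpa using hj) (hpre 20 (by omega))
          | succ j =>
            right
            exact (infix_iff_exists_drop _ _).2 ⟨j, by simpa using hj⟩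

theorem alt_iff (y : List Int) :
    check_consecutive_ones_alt y = true ↔ List.replicate 20 (1 : Int) <:+: y := by
  unfold check_consecutive_ones_alt
  rw [PySem.Chars.isIn_iff_infix, PySem.List.pyRepeat_singleton]
  show List.replicate ((20:Int).toNat) '1' <:+: _ ↔ _
  rw [infix_iff_exists_drop, infix_iff_exists_drop]
  constructor
  · rintro ⟨j, hj⟩
    rw [← List.map_drop] at hj
    exact ⟨j, (replicate_one_prefix_map _ _).1 hj⟩
  · rintro ⟨j, hj⟩
    refine ⟨j, ?_⟩
    rw [← List.map_drop]
    exact (replicate_one_prefix_map _ _).2 hj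

-- ===== VERDICT (by name: the statement is the Claim_ definition above) =====
theorem check_consecutive_ones_spec : Claim_equal_check_consecutive_ones := by
  intro y _
  show check_consecutive_ones y = check_consecutive_ones_alt y
  have hA : check_consecutive_ones y = true ↔ List.replicate 20 (1 : Int) <:+: y := by
    unfold check_consecutive_ones
    constructor
    · intro h
      have h20 : 20 ≤ check_consecutive_ones_go y 0 := by
        by_contra hc
        rw [if_neg hc] at h
        exact Bool.false_ne_true h
      rcases (go_spec y 0 (by omega) (by omega)).1 h20 with h' | h'
      · exact (show List.replicate 20 (1 : Int) <+: y by simpa using h').isInfix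
      · exact h'
    · intro h
      have h20 : 20 ≤ check_consecutive_ones_go y 0 :=
        (go_spec y 0 (by omega) (by omega)).2 (Or.inr h)
      rw [if_pos h20]
  have hB := alt_iff y
  by_cases h : List.replicate 20 (1 : Int) <:+: y
  · rw [hA.2 h, hB.2 h]
  · cases hx : check_consecutive_ones y
    · cases hx2 : check_consecutive_ones_alt y
      · rfl
      · exact absurd (hB.1 hx2) h
    · exact absurd (hA.1 hx) h
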